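-- pv_equiv track=rewrite | github.com/WilliamOwens/AdventOfCode2021Python | Day10/main.py | getIncompleteLinesScore
-- ===== SOURCE A (Python) =====
-- INCOMPLETE_SET_SCORE = {')': 1, ']': 2, '}': 3, '>': 4}
--
-- def getIncompleteLinesScore(incompleteLinesList):
--   totalScore = []
--   for i in incompleteLinesList:
--     lineScore = 0
--     for char in i:
--       lineScore *= 5
--       lineScore += INCOMPLETE_SET_SCORE[char]
--     totalScore.append(lineScore)
--   totalScore.sort()
--   return totalScore[int(len(totalScore) / 2)]
-- ===== SOURCE B (Python) =====
-- INCOMPLETE_SET_SCORE = {')': 1, ']': 2, '}': 3, '>': 4}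
--
-- def _quickselect(scores, k):
--     p = scores[0]
--     lt = [x for x in scores if x < p]
--     eq = [x for x in scores if x == p]
--     if k < len(lt):
--         return _quickselect(lt, k)
--     if k < len(lt) + len(eq):
--         return p
--     return _quickselect([x for x in scores if x > p], k - len(lt) - len(eq))
--
-- def getIncompleteLinesScore(incompleteLinesList):
--     totalScore = []
--     for line in incompleteLinesList:
--         lineScore = 0
--         for char in line:
--             lineScore = lineScore * 5 + INCOMPLETE_SET_SCORE[char]
--         totalScore.append(lineScore)
--     return _quickselect(totalScore, len(totalScore) // 2)
-- ===== Notes on version B (the rewrite author's own statement) =====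
-- stated objective: alternative
-- what changed: Replaces sorting the whole score list and indexing the middle with a deterministic quickselect (partition around the first score, recurse only into the side containing index len//2), so no full sort is performed.
import Mathlib
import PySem

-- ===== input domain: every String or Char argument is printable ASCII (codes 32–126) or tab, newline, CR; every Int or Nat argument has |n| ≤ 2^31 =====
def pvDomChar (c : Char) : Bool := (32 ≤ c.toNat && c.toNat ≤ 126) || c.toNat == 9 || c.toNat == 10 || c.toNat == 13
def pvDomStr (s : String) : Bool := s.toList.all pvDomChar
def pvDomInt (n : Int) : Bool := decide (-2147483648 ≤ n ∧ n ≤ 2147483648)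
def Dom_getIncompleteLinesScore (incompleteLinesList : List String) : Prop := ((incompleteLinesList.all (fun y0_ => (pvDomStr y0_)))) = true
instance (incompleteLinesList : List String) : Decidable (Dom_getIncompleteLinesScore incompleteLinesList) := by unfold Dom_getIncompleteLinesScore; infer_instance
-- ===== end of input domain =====

-- B replaces A's full sort + middle index with a quickselect that partitions the
-- scores around the first score and recurses only into the side holding index len//2
-- (alternative algorithm; same return value).

-- ===== PORT A =====
-- INCOMPLETE_SET_SCORE = {')': 1, ']': 2, '}': 3, '>': 4}
def pvIncompleteSetScore : PySem.Dict Char Int :=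
  PySem.Dict.ofList [(')', 1), (']', 2), ('}', 3), ('>', 4)]

-- literal port of A: build totalScore line by line, sort it, index the middle.
-- (A's dict lookup raises KeyError on other chars; Pre_ excludes those inputs,
-- so the getD default is never reached inside the claim.)
def getIncompleteLinesScore (incompleteLinesList : List String) : Int :=
  let totalScore : List Int := incompleteLinesList.foldl (fun acc i =>
    acc ++ [i.toList.foldl (fun lineScore char =>
      lineScore * 5 + PySem.Dict.getD pvIncompleteSetScore char 0) 0]) []
  let totalScore := PySem.List.sorted totalScore (fun x => x) false
  (PySem.List.pyGet? totalScore ((totalScore.length / 2 : Nat) : Int)).getD 0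

-- ===== PORT B =====
-- quickselect: partition around the first element, recurse into the side with index k
def pvQuickselect : List Int → Nat → Int
  | [], _ => 0   -- Python B raises IndexError here; unreachable inside Pre_
  | p :: t, k =>
    let lt := (p :: t).filter (fun x => decide (x < p))
    let eqc := (p :: t).filter (fun x => x == p)
    if k < lt.length then pvQuickselect lt k
    else if k < lt.length + eqc.length then p
    else pvQuickselect ((p :: t).filter (fun x => decide (p < x))) (k - lt.length - eqc.length)
termination_by l _ => l.length
decreasing_by
  · exact List.length_filter_lt_length_iff_exists.mpr ⟨p, List.mem_cons_self .., by simp⟩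
  · exact List.length_filter_lt_length_iff_exists.mpr ⟨p, List.mem_cons_self .., by simp⟩

def getIncompleteLinesScore_alt (incompleteLinesList : List String) : Int :=
  let totalScore : List Int := incompleteLinesList.foldl (fun acc line =>
    acc ++ [line.toList.foldl (fun lineScore char =>
      lineScore * 5 + PySem.Dict.getD pvIncompleteSetScore char 0) 0]) []
  pvQuickselect totalScore (totalScore.length / 2)

-- ===== PRECONDITION & SPEC =====
-- Pre_ excludes exactly the inputs where A raises: an empty list (IndexError on
-- totalScore[len//2]) and any line containing a char outside ')]}\>' (KeyError).
def Pre_getIncompleteLinesScore (incompleteLinesList : List String) : Prop :=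
  incompleteLinesList ≠ [] ∧
  (incompleteLinesList.all (fun s =>
    s.toList.all (fun c => c == ')' || c == ']' || c == '}' || c == '>'))) = true
instance (incompleteLinesList : List String) : Decidable (Pre_getIncompleteLinesScore incompleteLinesList) := by unfold Pre_getIncompleteLinesScore; infer_instance

def pvWitness_getIncompleteLinesScore : List String := [")>", "]"]

def Spec_getIncompleteLinesScore (incompleteLinesList : List String) (out : Int) : Prop := out = getIncompleteLinesScore_alt incompleteLinesList
instance (incompleteLinesList : List String) (out : Int) : Decidable (Spec_getIncompleteLinesScore incompleteLinesList out) := by unfold Spec_getIncompleteLinesScore; infer_instance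

-- ===== CLAIM (what is proved, stated in full; the proofs are below) =====
def Claim_equal_getIncompleteLinesScore : Prop := ∀ (incompleteLinesList : List String), Dom_getIncompleteLinesScore incompleteLinesList → Pre_getIncompleteLinesScore incompleteLinesList → Spec_getIncompleteLinesScore incompleteLinesList (getIncompleteLinesScore incompleteLinesList)

-- ===== LEMMAS AND PROOFS =====

-- the sorted list splits as (sorted lt) ++ eq ++ (sorted gt) around any pivot p
theorem pv_sorted_partition (l : List Int) (p : Int) :
    PySem.List.sorted l (fun x => x) false =
      PySem.List.sorted (l.filter (fun x => decide (x < p))) (fun x => x) false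
      ++ l.filter (fun x => x == p)
      ++ PySem.List.sorted (l.filter (fun x => decide (p < x))) (fun x => x) false := by
  apply PySem.List.sorted_id_eq_of_perm_of_pairwise
  · -- permutation
    have h0 : (l.filter (fun x => decide (x < p)) ++ l.filter (fun x => !decide (x < p))).Perm l :=
      List.filter_append_perm _ l
    have h1 : (l.filter (fun x => x == p) ++ l.filter (fun x => decide (p < x))).Perm
        (l.filter (fun x => !decide (x < p))) := by
      have e1 : (l.filter (fun x => !decide (x < p))).filter (fun x => x == p)
          = l.filter (fun x => x == p) := by
        rw [List.filter_filter]
        apply List.filter_congr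
        intro x _
        by_cases h : x = p
        · subst h; simp
        · simp [h]
      have e2 : (l.filter (fun x => !decide (x < p))).filter (fun x => !(x == p))
          = l.filter (fun x => decide (p < x)) := by
        rw [List.filter_filter]
        apply List.filter_congr
        intro x _
        by_cases h : x = p
        · subst h; simp
        · rw [show (x == p) = false from beq_eq_false_iff_ne.mpr h]
          simp only [Bool.not_false]
          rw [show decide (x < p) = !decide (p < x) by
            rcases lt_trichotomy x p with h1|h1|h1
            · simp [h1, not_lt_of_gt]
            · exact absurd h1 h
            · simp [h1, not_lt_of_gt]]
          simp
      have h2 := List.filter_append_perm (fun x => x == p) (l.filter (fun x => !decide (x < p)))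
      rwa [e1, e2] at h2
    rw [List.append_assoc]
    refine List.Perm.trans ?_ h0
    refine List.Perm.append (PySem.List.sorted_perm _ _ _) ?_
    refine List.Perm.trans ?_ h1
    exact List.Perm.append_left _ (PySem.List.sorted_perm _ _ _)
  · -- pairwise ≤
    have mlt : ∀ x ∈ PySem.List.sorted (l.filter (fun x => decide (x < p))) (fun x => x) false, x < p := by
      intro x hx
      have hm := (PySem.List.mem_sorted _ _ _ _).1 hx
      simpa using (List.mem_filter.1 hm).2
    have meq : ∀ x ∈ l.filter (fun x => x == p), x = p := by
      intro x hx
      simpa using (List.mem_filter.1 hx).2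
    have mgt : ∀ x ∈ PySem.List.sorted (l.filter (fun x => decide (p < x))) (fun x => x) false, p < x := by
      intro x hx
      have hm := (PySem.List.mem_sorted _ _ _ _).1 hx
      simpa using (List.mem_filter.1 hm).2
    rw [List.append_assoc, List.pairwise_append]
    refine ⟨by simpa using PySem.List.sorted_pairwise (l.filter (fun x => decide (x < p))) (fun x => x), ?_, ?_⟩
    · rw [List.pairwise_append]
      refine ⟨?_, by simpa using PySem.List.sorted_pairwise (l.filter (fun x => decide (p < x))) (fun x => x), ?_⟩
      · have hpp : ∀ a ∈ l.filter (fun x => x == p), ∀ b ∈ l.filter (fun x => x == p), a ≤ b := by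
          intro a ha b hb; rw [meq a ha, meq b hb]
        exact List.pairwise_iff_forall_sublist.2 (fun {a b} h =>
          hpp a (h.subset (.head _)) b (h.subset (.tail _ (.head _))))
      · intro a ha b hb
        have h1 := meq a ha; have h2 := mgt b hb; omega
    · intro a ha b hb
      have halt := mlt a ha
      rcases List.mem_append.1 hb with hb | hb
      · have h2 := meq b hb; omega
      · have h2 := mgt b hb; omega

theorem pv_quickselect_eq_sorted (n : Nat) : ∀ l : List Int, l.length ≤ n → ∀ k, k < l.length →
    pvQuickselect l k = (PySem.List.sorted l (fun x => x) false).getD k 0 := by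
  induction n with
  | zero => intro l hl k hk; omega
  | succ n ih =>
    intro l hl k hk
    match l with
    | [] => simp at hk
    | p :: t =>
      have hpart := pv_sorted_partition (p :: t) p
      have hlen : ((p :: t).filter (fun x => decide (x < p))).length
          + ((p :: t).filter (fun x => x == p)).length
          + ((p :: t).filter (fun x => decide (p < x))).length = (p :: t).length := by
        have hc := congrArg List.length hpart
        simp only [List.length_append, PySem.List.length_sorted] at hc
        omega
      have hltlen : ((p :: t).filter (fun x => decide (x < p))).length < (p :: t).length :=
        List.length_filter_lt_length_iff_exists.mpr ⟨p, List.mem_cons_self .., by simp⟩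
      have hgtlen : ((p :: t).filter (fun x => decide (p < x))).length < (p :: t).length :=
        List.length_filter_lt_length_iff_exists.mpr ⟨p, List.mem_cons_self .., by simp⟩
      rw [pvQuickselect, hpart]
      split
      · next hk1 =>
        rw [ih _ (by omega) k hk1]
        rw [List.append_assoc]
        rw [List.getD_append _ _ _ _ (by rwa [PySem.List.length_sorted])]
      · next hk1 =>
        rw [Nat.not_lt] at hk1
        split
        · next hk2 =>
          rw [List.append_assoc]
          rw [List.getD_append_right _ _ _ _ (by rwa [PySem.List.length_sorted])]
          rw [PySem.List.length_sorted]
          rw [List.getD_append _ _ _ _ (by omega)]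
          have hidx : k - ((p :: t).filter (fun x => decide (x < p))).length
              < ((p :: t).filter (fun x => x == p)).length := by omega
          have hmem : ((p :: t).filter (fun x => x == p)).getD
              (k - ((p :: t).filter (fun x => decide (x < p))).length) 0
              ∈ (p :: t).filter (fun x => x == p) := by
            rw [List.getD_eq_getElem _ _ hidx]
            exact List.getElem_mem _
          have hval := (List.mem_filter.1 hmem).2
          simpa using (by simpa using hval : _ = p).symm
        · next hk2 =>
          rw [Nat.not_lt] at hk2
          rw [ih _ (by omega) _ (by omega)]
          rw [List.append_assoc]
          rw [List.getD_append_right _ _ _ _ (by rw [PySem.List.length_sorted]; omega)]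
          rw [List.getD_append_right _ _ _ _ (by rw [PySem.List.length_sorted]; omega)]
          rw [PySem.List.length_sorted]

-- ===== VERDICT (by name: the statement is the Claim_ definition above) =====
theorem pv_median_key (ts : List Int) (hne : ts ≠ []) :
    (PySem.List.pyGet? (PySem.List.sorted ts (fun x => x) false)
        (((PySem.List.sorted ts (fun x => x) false).length / 2 : Nat) : Int)).getD 0
      = pvQuickselect ts (ts.length / 2) := by
  have hpos : 0 < ts.length := List.length_pos_iff.2 hne
  have hk : ts.length / 2 < ts.length := Nat.div_lt_self hpos (by omega)
  rw [pv_quickselect_eq_sorted ts.length ts le_rfl _ hk]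
  rw [PySem.List.length_sorted, PySem.List.pyGet?_natCast, ← List.getD_eq_getElem?_getD]

theorem getIncompleteLinesScore_spec : Claim_equal_getIncompleteLinesScore := by
  intro l _ hpre
  unfold Spec_getIncompleteLinesScore getIncompleteLinesScore getIncompleteLinesScore_alt
  refine pv_median_key _ ?_
  rw [PySem.List.foldl_append_singleton_eq_map]
  simp [hpre.1]
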